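-- pv_equiv track=rewrite | github.com/Mohit4022-cloud/EmailDJ | hub-api/email_generation/policies/offer_lock_policy.py | check_banned_phrases
-- ===== SOURCE A (Python) =====
-- def check_banned_phrases(
--     draft_lower: str,
--     banned_phrases: tuple[str, ...],
-- ) -> list[str]:
--     """Check for banned phrases in draft.
--
--     Args:
--         draft_lower: Lowercased full draft text.
--         banned_phrases: Tuple of phrase strings that must not appear.
--
--     Returns:
--         List of violation code strings, one per matched phrase.
--     """
--     violations: list[str] = []
--     for phrase in banned_phrases:
--         if phrase in draft_lower:
--             violations.append(f"banned_phrase:{phrase}")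
--     return violations
-- ===== SOURCE B (Python) =====
-- def check_banned_phrases(draft_lower, banned_phrases):
--     """Single sliding-window scan of the draft per distinct phrase length:
--     collect which phrases occur, then emit codes in tuple order."""
--     n = len(draft_lower)
--     lengths = set(len(p) for p in banned_phrases)
--     phrase_set = set(banned_phrases)
--     present = set()
--     for L in lengths:
--         for i in range(n - L + 1):
--             w = draft_lower[i:i + L]
--             if w in phrase_set:
--                 present.add(w)
--     return [f"banned_phrase:{p}" for p in banned_phrases if p in present]
-- ===== Notes on version B (the rewrite author's own statement) =====
-- stated objective: faster
-- what changed: Instead of running a separate substring search of the whole draft for each phrase, B slides a window over the draft once per distinct phrase length, collecting the phrases that occur into a present-set, then emits codes in tuple order by set membership.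
import Mathlib
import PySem

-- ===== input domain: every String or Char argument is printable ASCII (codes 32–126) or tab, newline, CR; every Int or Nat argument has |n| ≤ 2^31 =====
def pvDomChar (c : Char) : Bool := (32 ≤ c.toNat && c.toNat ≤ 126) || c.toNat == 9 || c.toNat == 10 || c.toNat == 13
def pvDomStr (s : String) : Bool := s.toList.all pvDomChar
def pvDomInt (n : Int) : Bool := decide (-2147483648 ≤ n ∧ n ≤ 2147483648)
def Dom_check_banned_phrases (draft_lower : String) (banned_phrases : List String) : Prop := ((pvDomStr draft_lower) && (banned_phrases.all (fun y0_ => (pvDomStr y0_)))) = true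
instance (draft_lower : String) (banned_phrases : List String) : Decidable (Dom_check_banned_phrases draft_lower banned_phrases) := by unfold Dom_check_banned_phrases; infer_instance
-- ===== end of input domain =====

-- B replaces A's per-phrase substring searches by one sliding-window scan of the draft per
-- distinct phrase length, collecting occurring phrases into a present-set; same return value.

-- shared helper: f"banned_phrase:{phrase}"
def pvTag (p : String) : String := String.ofList ("banned_phrase:".toList ++ p.toList)

-- ===== PORT A =====
def check_banned_phrases (draft_lower : String) (banned_phrases : List String) : List String :=
  banned_phrases.foldl
    (fun violations phrase =>
      if PySem.Str.isIn phrase draft_lower then violations ++ [pvTag phrase] else violations)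
    []

-- ===== PORT B =====
def check_banned_phrases_alt (draft_lower : String) (banned_phrases : List String) : List String :=
  let n : Int := PySem.Str.len draft_lower
  let lengths : PySem.Set Int := PySem.Set.ofList (banned_phrases.map (fun p => PySem.Str.len p))
  let phrase_set : PySem.Set String := PySem.Set.ofList banned_phrases
  let present : PySem.Set String :=
    lengths.foldl (fun pres L =>
      (PySem.List.pyRange 0 (n - L + 1) 1).foldl (fun pres i =>
        let w := PySem.Str.slice draft_lower (some i) (some (i + L))
        if phrase_set.contains w then PySem.Set.add pres w else pres) pres)
      PySem.Set.empty
  (banned_phrases.filter (fun p => present.contains p)).map pvTag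

-- ===== PRECONDITION & SPEC =====
def Spec_check_banned_phrases (draft_lower : String) (banned_phrases : List String) (out : List String) : Prop := out = check_banned_phrases_alt draft_lower banned_phrases
instance (draft_lower : String) (banned_phrases : List String) (out : List String) : Decidable (Spec_check_banned_phrases draft_lower banned_phrases out) := by unfold Spec_check_banned_phrases; infer_instance

-- ===== CLAIM (what is proved, stated in full; the proofs are below) =====
def Claim_equal_check_banned_phrases : Prop := ∀ (draft_lower : String) (banned_phrases : List String), Dom_check_banned_phrases draft_lower banned_phrases → Spec_check_banned_phrases draft_lower banned_phrases (check_banned_phrases draft_lower banned_phrases)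

-- ===== LEMMAS AND PROOFS =====

-- B's `present` set, extracted for the lemmas (definitionally the port's `let`)
def pvPresent (s : String) (bs : List String) : PySem.Set String :=
  (PySem.Set.ofList (bs.map (fun p => PySem.Str.len p))).foldl
    (fun pres L =>
      (PySem.List.pyRange 0 (PySem.Str.len s - L + 1) 1).foldl (fun pres i =>
        let w := PySem.Str.slice s (some i) (some (i + L))
        if (PySem.Set.ofList bs).contains w then PySem.Set.add pres w else pres) pres)
    PySem.Set.empty

theorem alt_eq_filter (s : String) (bs : List String) :
    check_banned_phrases_alt s bs
      = (bs.filter (fun p => (pvPresent s bs).contains p)).map pvTag := rfl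

theorem mem_inner (s : String) (ps : PySem.Set String) (L : Int) (is : List Int)
    (pres : PySem.Set String) (x : String) :
    x ∈ is.foldl (fun pres i =>
        let w := PySem.Str.slice s (some i) (some (i + L))
        if ps.contains w then PySem.Set.add pres w else pres) pres
      ↔ x ∈ pres ∨ (ps.contains x = true ∧
          ∃ i ∈ is, PySem.Str.slice s (some i) (some (i + L)) = x) := by
  induction is generalizing pres with
  | nil => simp
  | cons i is ih =>
    simp only [List.foldl_cons]
    rw [ih]
    by_cases h : ps.contains (PySem.Str.slice s (some i) (some (i + L))) = true
    · simp only [h, if_pos, PySem.Set.mem_add, List.mem_cons]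
      constructor
      · rintro ((hp | rfl) | ⟨hc, j, hj, hs⟩)
        · exact Or.inl hp
        · exact Or.inr ⟨h, i, Or.inl rfl, rfl⟩
        · exact Or.inr ⟨hc, j, Or.inr hj, hs⟩
      · rintro (hp | ⟨hc, j, (rfl | hj), hs⟩)
        · exact Or.inl (Or.inl hp)
        · exact Or.inl (Or.inr hs.symm)
        · exact Or.inr ⟨hc, j, hj, hs⟩
    · simp only [h, if_neg, Bool.not_eq_true, List.mem_cons]
      constructor
      · rintro (hp | ⟨hc, j, hj, hs⟩)
        · exact Or.inl hp
        · exact Or.inr ⟨hc, j, Or.inr hj, hs⟩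
      · rintro (hp | ⟨hc, j, (rfl | hj), hs⟩)
        · exact Or.inl hp
        · exact absurd (hs ▸ hc) h
        · exact Or.inr ⟨hc, j, hj, hs⟩

theorem mem_outer (s : String) (ps : PySem.Set String) (n : Int) (Ls : List Int)
    (pres : PySem.Set String) (x : String) :
    x ∈ Ls.foldl (fun pres L =>
        (PySem.List.pyRange 0 (n - L + 1) 1).foldl (fun pres i =>
          let w := PySem.Str.slice s (some i) (some (i + L))
          if ps.contains w then PySem.Set.add pres w else pres) pres) pres
      ↔ x ∈ pres ∨ (ps.contains x = true ∧
          ∃ L ∈ Ls, ∃ i ∈ PySem.List.pyRange 0 (n - L + 1) 1,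
            PySem.Str.slice s (some i) (some (i + L)) = x) := by
  induction Ls generalizing pres with
  | nil => simp
  | cons L Ls ih =>
    simp only [List.foldl_cons]
    rw [ih, mem_inner]
    simp only [List.mem_cons]
    constructor
    · rintro ((hp | ⟨hc, i, hi, hs⟩) | ⟨hc, M, hM, i, hi, hs⟩)
      · exact Or.inl hp
      · exact Or.inr ⟨hc, L, Or.inl rfl, i, hi, hs⟩
      · exact Or.inr ⟨hc, M, Or.inr hM, i, hi, hs⟩
    · rintro (hp | ⟨hc, M, (rfl | hM), i, hi, hs⟩)
      · exact Or.inl (Or.inl hp)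
      · exact Or.inl (Or.inr ⟨hc, i, hi, hs⟩)
      · exact Or.inr ⟨hc, M, hM, i, hi, hs⟩

theorem mem_pvPresent (s : String) (bs : List String) (x : String) :
    x ∈ pvPresent s bs
      ↔ (PySem.Set.ofList bs).contains x = true ∧
        ∃ L ∈ bs.map (fun p => PySem.Str.len p),
          ∃ i ∈ PySem.List.pyRange 0 (PySem.Str.len s - L + 1) 1,
            PySem.Str.slice s (some i) (some (i + L)) = x := by
  unfold pvPresent
  rw [mem_outer]
  simp only [PySem.Set.mem_ofList]
  constructor
  · rintro (h | ⟨hc, L, hL, hrest⟩)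
    · cases h
    · exact ⟨hc, L, hL, hrest⟩
  · rintro ⟨hc, L, hL, hrest⟩
    exact Or.inr ⟨hc, L, hL, hrest⟩

theorem present_iff_isIn (s : String) (bs : List String) (p : String) (hp : p ∈ bs) :
    (pvPresent s bs).contains p = PySem.Str.isIn p s := by
  rw [Bool.eq_iff_iff, PySem.Set.contains_iff, mem_pvPresent, PySem.Str.isIn_iff_infix]
  constructor
  · rintro ⟨-, L, hL, i, hi, hs⟩
    rw [PySem.List.mem_pyRange_one] at hi
    obtain ⟨q, -, rfl⟩ := List.mem_map.mp hL
    have h0 : (0:Int) ≤ PySem.Str.len q := by simp [pysem]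
    have := congrArg String.toList hs
    simp only [PySem.Str.toList_slice, PySem.Chars.slice_eq_listSlice] at this
    have hi' : i = ((i.toNat : Nat) : Int) := by omega
    have hL' : PySem.Str.len q = ((PySem.Str.len q).toNat : Int) := by omega
    rw [hi', hL', PySem.List.slice_natCast_add] at this
    rw [← this]
    exact ((List.take_prefix _ _).isInfix).trans ((List.drop_suffix _ _).isInfix)
  · intro hinf
    obtain ⟨t, u, hh⟩ := hinf
    refine ⟨(PySem.Set.contains_iff _ _).mpr ((PySem.Set.mem_ofList _ _).mpr hp), PySem.Str.len p, List.mem_map.mpr ⟨p, hp, rfl⟩, (t.length : Int), ?_, ?_⟩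
    · rw [PySem.List.mem_pyRange_one]
      have hlen : s.toList.length = t.length + p.toList.length + u.length := by
        rw [← hh]; simp; omega
      have hs' : PySem.Str.len s = (s.toList.length : Int) := by simp [pysem]
      have hp' : PySem.Str.len p = (p.toList.length : Int) := by simp [pysem]
      constructor
      · positivity
      · rw [hs', hp']; omega
    · apply String.ext
      have hp' : PySem.Str.len p = (p.toList.length : Int) := by simp [pysem]
      rw [PySem.Str.toList_slice, PySem.Chars.slice_eq_listSlice, hp', PySem.List.slice_natCast_add, ← hh,
        List.append_assoc, List.drop_left, List.take_left]

-- ===== VERDICT (by name: the statement is the Claim_ definition above) =====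
theorem check_banned_phrases_spec : Claim_equal_check_banned_phrases := by
  intro s bs _
  unfold Spec_check_banned_phrases check_banned_phrases
  rw [alt_eq_filter, PySem.List.foldl_append_if, List.nil_append]
  congr 1
  exact List.filter_congr (fun p hp => (present_iff_isIn s bs p hp).symm)
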